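-- pv_equiv track=rewrite | github.com/S0LD13R-CMD/Diff-Tool | visualization.py | _html_highlight_segments
-- ===== SOURCE A (Python) =====
-- def _html_color(content, css_class):
--     """Wraps content in a span with the specified CSS class."""
--     return f'<span class="{css_class}">{content}</span>'
--
-- def _html_yellow(content):
--     """Wraps content in a span with the modified CSS class."""
--     return _html_color(content, "modified")
--
-- def _html_highlight_segments(content, diff_indices):
--     """Highlights specific comma-separated segments in the content string with HTML."""
--     if not diff_indices:
--         return content
--
--     segments = content.split(',')
--     highlighted_segments = []
--
--     for i, segment in enumerate(segments):
--         if i in diff_indices: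
--             # Convert to string in case it's a numeric type
--             highlighted_segments.append(_html_yellow(str(segment)))
--         else:
--             highlighted_segments.append(segment)
--
--     return ','.join(highlighted_segments)
-- ===== SOURCE B (Python) =====
-- def _html_highlight_segments(content, diff_indices):
--     """Highlights specific comma-separated segments in the content string with HTML."""
--     if not diff_indices:
--         return content
--     segments = content.split(',')
--     n = len(segments)
--     for i in dict.fromkeys(diff_indices):  # dedupe, keep first-occurrence order
--         if 0 <= i < n:
--             segments[i] = '<span class="modified">' + segments[i] + '</span>'
--     return ','.join(segments)
-- ===== Notes on version B (the rewrite author's own statement) =====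
-- stated objective: simpler
-- what changed: B splits once, dedupes the indices and updates only the named segment positions in place, instead of scanning all of diff_indices ('i in diff_indices') for every segment.
import Mathlib
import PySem

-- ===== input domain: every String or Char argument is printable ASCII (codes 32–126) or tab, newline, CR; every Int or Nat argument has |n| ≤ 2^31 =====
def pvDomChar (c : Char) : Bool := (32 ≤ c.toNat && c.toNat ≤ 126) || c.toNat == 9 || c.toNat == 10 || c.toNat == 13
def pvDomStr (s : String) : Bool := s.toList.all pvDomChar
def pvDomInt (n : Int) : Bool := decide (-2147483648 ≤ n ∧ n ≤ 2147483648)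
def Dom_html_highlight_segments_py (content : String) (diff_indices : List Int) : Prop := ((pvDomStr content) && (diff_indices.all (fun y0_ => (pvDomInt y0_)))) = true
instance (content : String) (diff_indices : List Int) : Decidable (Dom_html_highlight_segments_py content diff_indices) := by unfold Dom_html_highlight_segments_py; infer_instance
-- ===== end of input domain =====

-- B changes the traversal (update only the deduped index positions instead of scanning diff_indices per segment); return value proved equal everywhere.
-- ===== PORT A =====
-- _html_color
def htmlColorA (content : String) (cssClass : String) : String :=
  PySem.Str.join "" ["<span class=\"", cssClass, "\">", content, "</span>"]
-- _html_yellow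
def htmlYellowA (content : String) : String := htmlColorA content "modified"

def html_highlight_segments_py (content : String) (diff_indices : List Int) : String :=
  if diff_indices.isEmpty then content
  else
    let segments := (PySem.Str.split? content ",").getD []
    let highlighted := (PySem.List.enumerate segments 0).foldl
      (fun acc p => if p.1 ∈ diff_indices then acc ++ [htmlYellowA p.2] else acc ++ [p.2]) []
    PySem.Str.join "," highlighted

-- ===== PORT B =====
def yellowB (s : String) : String :=
  PySem.Str.join "" ["<span class=\"modified\">", s, "</span>"]

def html_highlight_segments_py_alt (content : String) (diff_indices : List Int) : String :=
  if diff_indices.isEmpty then content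
  else
    let segments := (PySem.Str.split? content ",").getD []
    let n := segments.length
    let segments := (PySem.List.dedup diff_indices).foldl
      (fun acc i => if 0 ≤ i ∧ i < (n : Int) then acc.set i.toNat (yellowB (acc.getD i.toNat "")) else acc)
      segments
    PySem.Str.join "," segments

-- ===== PRECONDITION & SPEC =====
def Spec_html_highlight_segments_py (content : String) (diff_indices : List Int) (out : String) : Prop := out = html_highlight_segments_py_alt content diff_indices
instance (content : String) (diff_indices : List Int) (out : String) : Decidable (Spec_html_highlight_segments_py content diff_indices out) := by unfold Spec_html_highlight_segments_py; infer_instance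

-- ===== CLAIM (what is proved, stated in full; the proofs are below) =====
def Claim_equal_html_highlight_segments_py : Prop := ∀ (content : String) (diff_indices : List Int), Dom_html_highlight_segments_py content diff_indices → Spec_html_highlight_segments_py content diff_indices (html_highlight_segments_py content diff_indices)

-- ===== LEMMAS AND PROOFS =====

theorem yellow_eq (s : String) : yellowB s = htmlYellowA s := rfl

def updFold (n : Nat) (L : List Int) (segs : List String) : List String :=
  L.foldl (fun acc i => if 0 ≤ i ∧ i < (n : Int) then acc.set i.toNat (yellowB (acc.getD i.toNat "")) else acc) segs

theorem updFold_cons (n : Nat) (x : Int) (L : List Int) (segs : List String) :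
    updFold n (x :: L) segs
      = updFold n L (if 0 ≤ x ∧ x < (n : Int) then segs.set x.toNat (yellowB (segs.getD x.toNat "")) else segs) := rfl

theorem length_updFold (n : Nat) (L : List Int) (segs : List String) :
    (updFold n L segs).length = segs.length := by
  induction L generalizing segs with
  | nil => rfl
  | cons x L ih =>
    rw [updFold_cons, ih]
    split_ifs <;> simp

theorem getD_set_ne (xs : List String) (k m : Nat) (v : String) (h : k ≠ m) :
    (xs.set k v).getD m "" = xs.getD m "" := by
  rw [List.getD_eq_getElem?_getD, List.getElem?_set_ne h, ← List.getD_eq_getElem?_getD]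

theorem getD_set_self (xs : List String) (k : Nat) (v : String) (h : k < xs.length) :
    (xs.set k v).getD k "" = v := by
  rw [List.getD_eq_getElem?_getD, List.getElem?_set_self h, Option.getD_some]

theorem getD_updFold (n : Nat) (L : List Int) (hL : L.Nodup) (segs : List String)
    (hlen : segs.length = n) (j : Nat) (hj : j < n) :
    (updFold n L segs).getD j "" = if (j : Int) ∈ L then yellowB (segs.getD j "") else segs.getD j "" := by
  induction L generalizing segs with
  | nil => simp [updFold]
  | cons x L ih =>
    rcases List.nodup_cons.mp hL with ⟨hxL, hnd⟩
    rw [updFold_cons]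
    by_cases hx : 0 ≤ x ∧ x < (n : Int)
    · rw [if_pos hx]
      have hxlt : x.toNat < segs.length := by omega
      have hlen' : (segs.set x.toNat (yellowB (segs.getD x.toNat ""))).length = n := by
        simp [hlen]
      rw [ih hnd _ hlen']
      by_cases hmem : (j : Int) ∈ L
      · have hne : x.toNat ≠ j := by
          intro h
          have hxj : x = (j : Int) := by omega
          exact hxL (hxj ▸ hmem)
        rw [if_pos hmem, if_pos (List.mem_cons_of_mem _ hmem), getD_set_ne _ _ _ _ hne]
      · by_cases hjx : (j : Int) = x
        · have hxj : x.toNat = j := by omega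
          rw [if_neg hmem, if_pos (by simp [hjx]), ← hxj, getD_set_self _ _ _ hxlt]
        · have hne : x.toNat ≠ j := by omega
          rw [if_neg hmem, if_neg (by simp [hjx, hmem]), getD_set_ne _ _ _ _ hne]
    · rw [if_neg hx, ih hnd segs hlen]
      have hjx : ¬ ((j : Int) = x) := by intro h; exact hx ⟨by omega, by omega⟩
      simp [hjx]

theorem foldA_eq_map (D : List Int) (l : List (Int × String)) (acc : List String) :
    l.foldl (fun acc p => if p.1 ∈ D then acc ++ [htmlYellowA p.2] else acc ++ [p.2]) acc
      = acc ++ l.map (fun p => if p.1 ∈ D then htmlYellowA p.2 else p.2) := by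
  induction l generalizing acc with
  | nil => simp
  | cons x l ih => simp only [List.foldl_cons, List.map_cons]; split_ifs <;> simp [ih]

theorem core_eq (segs : List String) (D : List Int) :
    (PySem.List.enumerate segs 0).map (fun p => if p.1 ∈ D then htmlYellowA p.2 else p.2)
      = updFold segs.length (PySem.List.dedup D) segs := by
  apply List.ext_getElem
  · simp [length_updFold, PySem.List.length_enumerate]
  · intro j hj hj'
    have hjlen : j < segs.length := by
      simpa [PySem.List.length_enumerate] using hj
    rw [List.getElem_map, PySem.List.getElem_enumerate]
    have h1 : (updFold segs.length (PySem.List.dedup D) segs)[j]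
        = (updFold segs.length (PySem.List.dedup D) segs).getD j "" := by
      rw [List.getD_eq_getElem?_getD, List.getElem?_eq_getElem hj', Option.getD_some]
    rw [h1, getD_updFold segs.length (PySem.List.dedup D) (PySem.List.nodup_dedup D) segs rfl j hjlen]
    simp [yellow_eq, List.getD_eq_getElem?_getD, List.getElem?_eq_getElem hjlen]

-- ===== VERDICT (by name: the statement is the Claim_ definition above) =====
theorem html_highlight_segments_py_spec : Claim_equal_html_highlight_segments_py := by
  intro content diff_indices _
  unfold Spec_html_highlight_segments_py html_highlight_segments_py html_highlight_segments_py_alt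
  by_cases h : diff_indices.isEmpty
  · simp [h]
  · simp only [h]
    rw [foldA_eq_map, List.nil_append, core_eq]
    rfl
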